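-- pv_equiv track=rewrite | github.com/EsosaOrumwese/fraud-detection-system | scripts/dev_substrate/pr3_wsp_replay_dispatch.py | extract_failure_markers
-- ===== SOURCE A (Python) =====
-- def extract_failure_markers(lines: list[str]) -> list[str]:
--     markers: list[str] = []
--     wanted = (
--         "IG_PUSH_REJECTED",
--         "PUBLISH_AMBIGUOUS",
--         "KAFKA_PUBLISH_TIMEOUT",
--         "IG_UNHEALTHY",
--         "BUS_UNHEALTHY",
--         "http_503",
--         "http_429",
--         "timeout",
--     )
--     for line in lines:
--         upper = line.upper()
--         for marker in wanted:
--             if marker.upper() not in upper: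
--                 continue
--             if marker not in markers:
--                 markers.append(marker)
--     return markers
-- ===== SOURCE B (Python) =====
-- WANTED = (
--     "IG_PUSH_REJECTED",
--     "PUBLISH_AMBIGUOUS",
--     "KAFKA_PUBLISH_TIMEOUT",
--     "IG_UNHEALTHY",
--     "BUS_UNHEALTHY",
--     "http_503",
--     "http_429",
--     "timeout",
-- )
--
--
-- def extract_failure_markers(lines: list[str]) -> list[str]:
--     # Worklist: markers not yet seen; each line appends its hits and shrinks the worklist.
--     found: list[str] = []
--     remaining = list(WANTED)
--     for line in lines:
--         if not remaining:
--             break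
--         upper = line.upper()
--         hits = [m for m in remaining if m.upper() in upper]
--         if hits:
--             found += hits
--             remaining = [m for m in remaining if m.upper() not in upper]
--     return found
-- ===== Notes on version B (the rewrite author's own statement) =====
-- stated objective: alternative
-- what changed: B maintains a shrinking worklist of not-yet-found markers and appends each line's hits in bulk (with early exit when the worklist is empty), instead of A's rescanning all eight markers per line with a membership test against the growing result list.
import Mathlib
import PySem

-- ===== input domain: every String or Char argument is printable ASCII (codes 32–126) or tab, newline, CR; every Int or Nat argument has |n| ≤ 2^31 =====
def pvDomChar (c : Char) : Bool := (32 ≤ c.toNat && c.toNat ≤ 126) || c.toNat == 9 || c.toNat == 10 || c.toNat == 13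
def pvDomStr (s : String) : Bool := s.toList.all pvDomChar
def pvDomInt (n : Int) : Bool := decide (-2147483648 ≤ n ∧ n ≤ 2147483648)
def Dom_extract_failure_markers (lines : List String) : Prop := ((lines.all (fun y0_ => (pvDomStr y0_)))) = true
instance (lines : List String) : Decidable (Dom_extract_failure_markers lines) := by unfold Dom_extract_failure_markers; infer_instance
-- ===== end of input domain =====

-- B replaces A's per-line rescan of all eight markers (with a membership test against the
-- growing result list) by a shrinking worklist of not-yet-found markers appended per line in
-- bulk, with an early exit once the worklist is empty; objective: alternative decomposition.


-- ===== PORT A =====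
-- the fixed tuple 'wanted' of both Pythons
def pvWanted : List String :=
  ["IG_PUSH_REJECTED", "PUBLISH_AMBIGUOUS", "KAFKA_PUBLISH_TIMEOUT", "IG_UNHEALTHY",
   "BUS_UNHEALTHY", "http_503", "http_429", "timeout"]

-- 'marker.upper() in upper' (both Pythons perform exactly this test)
def markerHit (upper marker : String) : Bool :=
  PySem.Str.isIn (PySem.Str.upper marker) upper

-- A: for each line, scan all of wanted; 'continue' on a miss becomes the guard of the if;
-- 'if marker not in markers: markers.append(marker)' is the inner if
def extract_failure_markers (lines : List String) : List String :=
  lines.foldl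
    (fun markers line =>
      let upper := PySem.Str.upper line
      pvWanted.foldl
        (fun markers marker =>
          if markerHit upper marker then
            if markers.contains marker then markers else markers ++ [marker]
          else markers)
        markers)
    []

-- ===== PORT B =====
-- the worklist loop of Source B: state = (found, remaining); 'break' on an empty worklist,
-- 'if hits: found += hits; remaining = [...]'
def goAlt : List String → List String → List String → List String
  | [], found, _ => found
  | line :: rest, found, remaining =>
    if remaining.isEmpty then found
    else
      let upper := PySem.Str.upper line
      let hits := remaining.filter (fun m => markerHit upper m)
      if hits.isEmpty then goAlt rest found remaining
      else goAlt rest (found ++ hits) (remaining.filter (fun m => !(markerHit upper m)))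

def extract_failure_markers_alt (lines : List String) : List String :=
  goAlt lines [] pvWanted

-- ===== PRECONDITION & SPEC =====
def Spec_extract_failure_markers (lines : List String) (out : List String) : Prop := out = extract_failure_markers_alt lines
instance (lines : List String) (out : List String) : Decidable (Spec_extract_failure_markers lines out) := by unfold Spec_extract_failure_markers; infer_instance

-- ===== CLAIM (what is proved, stated in full; the proofs are below) =====
def Claim_equal_extract_failure_markers : Prop := ∀ (lines : List String), Dom_extract_failure_markers lines → Spec_extract_failure_markers lines (extract_failure_markers lines)

-- ===== LEMMAS AND PROOFS =====

-- A's inner loop over a duplicate-free marker list appends exactly the new hits, in order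
theorem innerA_eq (upper : String) :
    ∀ (w markers : List String), w.Nodup →
      w.foldl
        (fun markers marker =>
          if markerHit upper marker then
            if markers.contains marker then markers else markers ++ [marker]
          else markers) markers
      = markers ++ w.filter (fun m => markerHit upper m && !(markers.contains m)) := by
  intro w
  induction w with
  | nil => intro markers _; simp
  | cons m w ih =>
    intro markers hnd
    rcases List.nodup_cons.mp hnd with ⟨hm, hw⟩
    simp only [List.foldl_cons, List.filter_cons]
    by_cases hhit : markerHit upper m = true
    · rw [if_pos hhit]
      by_cases hmem : markers.contains m = true
      · rw [if_pos (by simpa using hmem), if_neg (by simpa [hhit] using hmem), ih _ hw]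
      · rw [Bool.not_eq_true] at hmem
        rw [if_neg (by simpa using hmem), if_pos (by simpa [hhit] using hmem), ih _ hw,
          List.append_assoc, List.singleton_append]
        congr 2
        apply List.filter_congr
        intro x hx
        have hxm : x ≠ m := fun h => hm (h ▸ hx)
        simp [hxm]
    · rw [Bool.not_eq_true] at hhit
      rw [if_neg (by simp [hhit]), if_neg (by simp [hhit]), ih _ hw]

-- once every wanted marker is found, A's remaining outer iterations change nothing
theorem outerA_done (found : List String)
    (h : ∀ m ∈ pvWanted, found.contains m = true) :
    ∀ (rest : List String),
      rest.foldl
        (fun markers line =>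
          let upper := PySem.Str.upper line
          pvWanted.foldl
            (fun markers marker =>
              if markerHit upper marker then
                if markers.contains marker then markers else markers ++ [marker]
              else markers) markers) found
      = found := by
  intro rest
  induction rest with
  | nil => rfl
  | cons line rest ih =>
    have hnd : pvWanted.Nodup := by decide
    simp only [List.foldl_cons]
    rw [innerA_eq _ _ _ hnd, List.filter_eq_nil_iff.mpr (by
      intro m hm
      have hmem : m ∈ found := by simpa using h m hm
      simp [hmem]), List.append_nil, ih]


-- main invariant: A's outer fold from 'found' equals B's worklist loop whenever
-- remaining = the wanted markers not yet in found
theorem main_inv :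
    ∀ (lines found rem : List String),
      rem = pvWanted.filter (fun m => !(found.contains m)) →
      lines.foldl
        (fun markers line =>
          let upper := PySem.Str.upper line
          pvWanted.foldl
            (fun markers marker =>
              if markerHit upper marker then
                if markers.contains marker then markers else markers ++ [marker]
              else markers) markers) found
      = goAlt lines found rem := by
  intro lines
  induction lines with
  | nil => intro found rem _; rfl
  | cons line rest ih =>
    intro found rem hrem
    have hnd : pvWanted.Nodup := by decide
    simp only [List.foldl_cons, goAlt]
    set upper := PySem.Str.upper line with hupper
    rw [innerA_eq upper _ _ hnd]
    have hfa : pvWanted.filter (fun m => markerHit upper m && !(found.contains m))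
        = rem.filter (fun m => markerHit upper m) := by
      rw [hrem, List.filter_filter]
    by_cases hempty : rem.isEmpty
    · rw [if_pos hempty]
      rw [List.isEmpty_iff] at hempty
      have hall : ∀ m ∈ pvWanted, found.contains m = true := by
        intro m hm
        by_contra hc
        rw [Bool.not_eq_true] at hc
        have : m ∈ pvWanted.filter (fun m => !(found.contains m)) :=
          List.mem_filter.mpr ⟨hm, by simpa using hc⟩
        rw [← hrem, hempty] at this
        exact absurd this (List.not_mem_nil)
      rw [List.filter_eq_nil_iff.mpr (by
        intro m hm
        have hmem : m ∈ found := by simpa using hall m hm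
        simp [hmem]), List.append_nil, outerA_done found hall rest]
    · rw [if_neg hempty]
      have hnext : rem.filter (fun m => !(markerHit upper m))
          = pvWanted.filter (fun m =>
              !((found ++ rem.filter (fun m => markerHit upper m)).contains m)) := by
        rw [hrem, List.filter_filter]
        apply List.filter_congr
        intro x hx
        by_cases hf : x ∈ found
        · simp [hf]
        · have hxrem : x ∈ rem := by
            rw [hrem]; exact List.mem_filter.mpr ⟨hx, by simp [hf]⟩
          by_cases hh : markerHit upper x = true
          · simp [hf, hh, hx]
          · rw [Bool.not_eq_true] at hh
            simp [hf, hh, hx]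
      by_cases hhits : (rem.filter (fun m => markerHit upper m)).isEmpty
      · rw [if_pos hhits]
        rw [List.isEmpty_iff] at hhits
        have hrem2 : rem.filter (fun m => !(markerHit upper m)) = rem := by
          apply List.filter_eq_self.mpr
          intro m hm
          have hnm : m ∉ rem.filter (fun m => markerHit upper m) := by simp [hhits]
          simp only [List.mem_filter, not_and] at hnm
          have h3 : markerHit upper m = false := by simpa using hnm hm
          simp [h3]
        rw [hfa, hhits, List.append_nil]
        exact ih found rem hrem
      · rw [if_neg hhits, hfa]
        exact ih _ _ (by rw [← hnext])

-- ===== VERDICT (by name: the statement is the Claim_ definition above) =====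
theorem extract_failure_markers_spec : Claim_equal_extract_failure_markers := by
  intro lines _
  unfold Spec_extract_failure_markers extract_failure_markers extract_failure_markers_alt
  exact main_inv lines [] pvWanted (by decide)
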